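-- pv_equiv track=rewrite | github.com/DravenGong/skeleton-code-B_2 | Board.py | filling
-- ===== SOURCE A (Python) =====
-- def filling(blocks, size):
--     map = {}
--     for i in range(0,size):
--         for j in range(0, size):
--             map.update({(i, j): "empty"})
--             for block in blocks:
--                 if block[1] == i and block[2] == j:
--                     map[(i,j)] = "b"
--     return map
-- ===== SOURCE B (Python) =====
-- def filling(blocks, size):
--     grid = {(i, j): "empty" for i in range(size) for j in range(size)}
--     if size > 0:
--         for block in blocks:
--             r = block[1]
--             if 0 <= r < size:
--                 c = block[2]
--                 if 0 <= c < size: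
--                     grid[(r, c)] = "b"
--     return grid
-- ===== Notes on version B (the rewrite author's own statement) =====
-- stated objective: simpler
-- what changed: A rescans the whole block list inside the nested cell loops; B builds the full grid once with a dict comprehension and then marks cells in a single separate pass over blocks with in-range guards.
import Mathlib
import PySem

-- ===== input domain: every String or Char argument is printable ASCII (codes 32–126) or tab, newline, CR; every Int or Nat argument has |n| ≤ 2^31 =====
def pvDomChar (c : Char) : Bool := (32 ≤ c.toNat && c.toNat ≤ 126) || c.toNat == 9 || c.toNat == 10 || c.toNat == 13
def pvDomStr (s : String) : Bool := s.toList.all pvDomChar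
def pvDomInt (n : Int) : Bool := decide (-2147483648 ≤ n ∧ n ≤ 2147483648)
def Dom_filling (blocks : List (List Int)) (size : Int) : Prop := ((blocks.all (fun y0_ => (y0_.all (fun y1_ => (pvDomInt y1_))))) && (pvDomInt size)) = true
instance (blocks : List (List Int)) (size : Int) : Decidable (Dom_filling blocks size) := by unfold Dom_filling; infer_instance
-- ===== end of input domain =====

-- B replaces A's nested cell×block scan by one grid-building pass plus one separate pass over blocks (simpler decomposition).
-- Shared dict primitive: Python's `d[k] = v` / `d.update({k: v})` on an insertion-order
-- association list of flat triples (overwrite first match in place, else append). Exact.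
def dinsert (m : List (Int × Int × String)) (k : Int × Int) (v : String) : List (Int × Int × String) :=
  match m with
  | [] => [(k.1, k.2, v)]
  | (a, b, w) :: t =>
    if a = k.1 ∧ b = k.2 then (a, b, v) :: t else (a, b, w) :: dinsert t k v

-- ===== PORT A =====
-- innermost loop body: `if block[1] == i and block[2] == j: map[(i,j)] = "b"` (short-circuit `and`)
def stepBlockA (i j : Int) (m : List (Int × Int × String)) (block : List Int) : List (Int × Int × String) :=
  match PySem.List.pyGet? block 1 with
  | some r =>
    if r = i then
      match PySem.List.pyGet? block 2 with
      | some c => if c = j then dinsert m (i, j) "b" else m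
      | none => m
    else m
  | none => m

-- body of the `for j` loop: `map.update({(i, j): "empty"})` then the `for block` loop
def stepCellA (blocks : List (List Int)) (i : Int) (m : List (Int × Int × String)) (j : Int) : List (Int × Int × String) :=
  blocks.foldl (stepBlockA i j) (dinsert m (i, j) "empty")

-- body of the `for i` loop
def stepRowA (blocks : List (List Int)) (size : Int) (m : List (Int × Int × String)) (i : Int) : List (Int × Int × String) :=
  (PySem.List.pyRange 0 size 1).foldl (stepCellA blocks i) m

def filling (blocks : List (List Int)) (size : Int) : List (Int × Int × String) :=
  (PySem.List.pyRange 0 size 1).foldl (stepRowA blocks size) []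

-- ===== PORT B =====
-- body of B's single loop over blocks: `r = block[1]`, check row range, then `c = block[2]`, check column range, mark
def stepBlockB (size : Int) (g : List (Int × Int × String)) (block : List Int) : List (Int × Int × String) :=
  match PySem.List.pyGet? block 1 with
  | some r =>
    if 0 ≤ r ∧ r < size then
      match PySem.List.pyGet? block 2 with
      | some c => if 0 ≤ c ∧ c < size then dinsert g (r, c) "b" else g
      | none => g
    else g
  | none => g

def filling_alt (blocks : List (List Int)) (size : Int) : List (Int × Int × String) :=
  let grid := (PySem.List.pyRange 0 size 1).flatMap (fun i =>
    (PySem.List.pyRange 0 size 1).map (fun j => (i, j, "empty")))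
  if 0 < size then blocks.foldl (stepBlockB size) grid else grid

-- ===== PRECONDITION & SPEC =====
-- Pre_ excludes exactly the inputs on which Python A raises IndexError: size > 0 together
-- with some block of length < 2, or some block of length 2 whose block[1] lies in [0, size)
-- (there A evaluates block[2]). On every input A returns on, B returns the same dict.
def preFillingOk (size : Int) (b : List Int) : Bool :=
  decide (2 ≤ b.length) &&
    (!((PySem.List.pyGet? b 1).any (fun r => decide (0 ≤ r) && decide (r < size))) || decide (3 ≤ b.length))
def Pre_filling (blocks : List (List Int)) (size : Int) : Prop :=
  (decide (size ≤ 0) || blocks.all (preFillingOk size)) = true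
instance (blocks : List (List Int)) (size : Int) : Decidable (Pre_filling blocks size) := by unfold Pre_filling; infer_instance
def pvWitness_filling : List (List Int) × Int := ([[9, 0, 1], [9, 5, 5]], 2)
def Spec_filling (blocks : List (List Int)) (size : Int) (out : List (Int × Int × String)) : Prop := out = filling_alt blocks size
instance (blocks : List (List Int)) (size : Int) (out : List (Int × Int × String)) : Decidable (Spec_filling blocks size out) := by unfold Spec_filling; infer_instance

-- ===== CLAIM (what is proved, stated in full; the proofs are below) =====
def Claim_equal_filling : Prop := ∀ (blocks : List (List Int)) (size : Int), Dom_filling blocks size → Pre_filling blocks size → Spec_filling blocks size (filling blocks size)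

-- ===== LEMMAS AND PROOFS =====

-- does block `b` hit cell (i, j)?
def hitA (i j : Int) (b : List Int) : Bool :=
  (PySem.List.pyGet? b 1 == some i) && (PySem.List.pyGet? b 2 == some j)

-- the grid in i-major, j-minor insertion order, cell values given by v
def gridOf (size : Int) (v : Int → Int → String) : List (Int × Int × String) :=
  (PySem.List.pyRange 0 size 1).flatMap (fun i =>
    (PySem.List.pyRange 0 size 1).map (fun j => (i, j, v i j)))

def markOf (blocks : List (List Int)) (i j : Int) : String :=
  if blocks.any (hitA i j) then "b" else "empty"

lemma gridOf_congr (size : Int) (v w : Int → Int → String)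
    (h : ∀ i j, 0 ≤ i → i < size → 0 ≤ j → j < size → v i j = w i j) :
    gridOf size v = gridOf size w := by
  unfold gridOf
  rw [List.flatMap_def, List.flatMap_def]
  refine congrArg List.flatten (List.map_congr_left ?_)
  intro i hi
  rw [PySem.List.mem_pyRange_one] at hi
  refine List.map_congr_left ?_
  intro j hj
  rw [PySem.List.mem_pyRange_one] at hj
  rw [h i j hi.1 hi.2 hj.1 hj.2]

lemma dinsert_of_not_mem (m : List (Int × Int × String)) (k : Int × Int) (v : String)
    (h : ∀ e ∈ m, ¬(e.1 = k.1 ∧ e.2.1 = k.2)) :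
    dinsert m k v = m ++ [(k.1, k.2, v)] := by
  induction m with
  | nil => rfl
  | cons e t ih =>
    obtain ⟨a, b, w⟩ := e
    have hne : ¬(a = k.1 ∧ b = k.2) := h (a, b, w) (List.mem_cons_self ..)
    simp only [dinsert, if_neg hne, List.cons_append, List.cons.injEq, true_and]
    exact ih (fun e he => h e (List.mem_cons_of_mem _ he))

lemma dinsert_overwrite_last (m : List (Int × Int × String)) (k : Int × Int) (x v : String)
    (h : ∀ e ∈ m, ¬(e.1 = k.1 ∧ e.2.1 = k.2)) :
    dinsert (m ++ [(k.1, k.2, x)]) k v = m ++ [(k.1, k.2, v)] := by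
  induction m with
  | nil => simp [dinsert]
  | cons e t ih =>
    obtain ⟨a, b, w⟩ := e
    have hne : ¬(a = k.1 ∧ b = k.2) := h (a, b, w) (List.mem_cons_self ..)
    simp only [List.cons_append, dinsert, if_neg hne, List.cons.injEq, true_and]
    exact ih (fun e he => h e (List.mem_cons_of_mem _ he))

lemma stepBlockA_eq (i j : Int) (m : List (Int × Int × String)) (b : List Int) :
    stepBlockA i j m b = if hitA i j b then dinsert m (i, j) "b" else m := by
  unfold stepBlockA hitA
  rcases h1 : PySem.List.pyGet? b 1 with _ | r
  · simp
  rcases h2 : PySem.List.pyGet? b 2 with _ | c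
  · by_cases hr : r = i <;> simp [hr]
  by_cases hr : r = i <;> by_cases hc : c = j <;> simp [hr, hc]

lemma blocksFoldA (i j : Int) (bs : List (List Int)) (m : List (Int × Int × String)) (x : String)
    (h : ∀ e ∈ m, ¬(e.1 = i ∧ e.2.1 = j)) :
    bs.foldl (stepBlockA i j) (m ++ [(i, j, x)])
      = m ++ [(i, j, if bs.any (hitA i j) then "b" else x)] := by
  induction bs generalizing x with
  | nil => simp
  | cons b bs ih =>
    rw [List.foldl_cons, stepBlockA_eq]
    by_cases hb : hitA i j b
    · rw [if_pos hb, dinsert_overwrite_last m (i, j) x "b" h, ih "b"]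
      have hany : (b :: bs).any (hitA i j) = true := by simp [List.any_cons, hb]
      rw [hany]
      simp
    · rw [if_neg hb, ih x]
      have hany : (b :: bs).any (hitA i j) = bs.any (hitA i j) := by simp [List.any_cons, hb]
      rw [hany]

lemma stepCellA_eq (blocks : List (List Int)) (i j : Int) (m : List (Int × Int × String))
    (h : ∀ e ∈ m, ¬(e.1 = i ∧ e.2.1 = j)) :
    stepCellA blocks i m j = m ++ [(i, j, markOf blocks i j)] := by
  unfold stepCellA markOf
  rw [dinsert_of_not_mem m (i, j) "empty" h]
  exact blocksFoldA i j blocks m "empty" h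

lemma rowFoldA (blocks : List (List Int)) (i : Int) (js : List Int)
    (m : List (Int × Int × String)) (hnd : js.Nodup)
    (h : ∀ j ∈ js, ∀ e ∈ m, ¬(e.1 = i ∧ e.2.1 = j)) :
    js.foldl (stepCellA blocks i) m = m ++ js.map (fun j => (i, j, markOf blocks i j)) := by
  induction js generalizing m with
  | nil => simp
  | cons j js ih =>
    rw [List.foldl_cons, stepCellA_eq blocks i j m (h j (List.mem_cons_self ..))]
    rw [ih _ (List.Nodup.of_cons hnd) ?_]
    · simp
    · intro j' hj' e he
      rcases List.mem_append.1 he with hm | hx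
      · exact h j' (List.mem_cons_of_mem _ hj') e hm
      · simp only [List.mem_singleton] at hx
        subst hx
        have : j ≠ j' := fun hjj => (List.nodup_cons.1 hnd).1 (hjj ▸ hj')
        simp only [not_and]
        intro _; exact this

lemma gridFoldA (blocks : List (List Int)) (size : Int) (is : List Int)
    (m : List (Int × Int × String)) (hnd : is.Nodup)
    (h : ∀ i ∈ is, ∀ e ∈ m, e.1 ≠ i) :
    is.foldl (stepRowA blocks size) m
      = m ++ is.flatMap (fun i => (PySem.List.pyRange 0 size 1).map (fun j => (i, j, markOf blocks i j))) := by
  induction is generalizing m with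
  | nil => simp
  | cons i is ih =>
    rw [List.foldl_cons]
    have hrow : stepRowA blocks size m i
        = m ++ (PySem.List.pyRange 0 size 1).map (fun j => (i, j, markOf blocks i j)) := by
      unfold stepRowA
      exact rowFoldA blocks i _ m (PySem.List.nodup_pyRange_one 0 size)
        (fun j _ e he hij => h i (List.mem_cons_self ..) e he hij.1)
    rw [hrow, ih _ (List.Nodup.of_cons hnd) ?_]
    · simp
    · intro i' hi' e he
      rcases List.mem_append.1 he with hm | hx
      · exact h i' (List.mem_cons_of_mem _ hi') e hm
      · simp only [List.mem_map] at hx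
        obtain ⟨j, _, rfl⟩ := hx
        intro hii
        have hii' : i = i' := hii
        exact (List.nodup_cons.1 hnd).1 (by rw [hii']; exact hi')

lemma filling_eq_gridOf (blocks : List (List Int)) (size : Int) :
    filling blocks size = gridOf size (markOf blocks) := by
  unfold filling gridOf
  rw [gridFoldA blocks size _ [] (PySem.List.nodup_pyRange_one 0 size) (by simp)]
  simp

-- B side

lemma mapOverwrite_of_not_mem (t : List (Int × Int × String)) (r c : Int) (x : String)
    (h : ∀ e ∈ t, ¬(e.1 = r ∧ e.2.1 = c)) :
    t.map (fun e => if e.1 = r ∧ e.2.1 = c then (e.1, e.2.1, x) else e) = t := by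
  induction t with
  | nil => rfl
  | cons e t ih =>
    simp only [List.map_cons, if_neg (h e (List.mem_cons_self ..)), List.cons.injEq, true_and]
    exact ih (fun e he => h e (List.mem_cons_of_mem _ he))

lemma dinsert_eq_map_of_mem (L : List (Int × Int × String)) (r c : Int) (x : String)
    (hnd : (L.map (fun e => (e.1, e.2.1))).Nodup)
    (hmem : (r, c) ∈ L.map (fun e => (e.1, e.2.1))) :
    dinsert L (r, c) x = L.map (fun e => if e.1 = r ∧ e.2.1 = c then (e.1, e.2.1, x) else e) := by
  induction L with
  | nil => simp at hmem
  | cons e t ih =>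
    obtain ⟨a, b, w⟩ := e
    by_cases hk : a = r ∧ b = c
    · obtain ⟨rfl, rfl⟩ := hk
      have hnt : ∀ e ∈ t, ¬(e.1 = a ∧ e.2.1 = b) := by
        intro e he hab
        have := (List.nodup_cons.1 hnd).1
        exact this (by
          simp only [List.mem_map]
          exact ⟨e, he, by simp [hab.1, hab.2]⟩)
      simp [dinsert, mapOverwrite_of_not_mem t a b x hnt]
    · simp only [List.map_cons, List.mem_cons, Prod.mk.injEq] at hmem
      rcases hmem with ⟨rfl, rfl⟩ | hmem2
      · exact absurd ⟨rfl, rfl⟩ hk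
      · simp only [dinsert, if_neg hk, List.map_cons, List.cons.injEq, true_and]
        exact ih (List.Nodup.of_cons hnd) hmem2

lemma gridOf_keys (size : Int) (v : Int → Int → String) :
    (gridOf size v).map (fun e => (e.1, e.2.1))
      = (PySem.List.pyRange 0 size 1).flatMap (fun i =>
          (PySem.List.pyRange 0 size 1).map (fun j => (i, j))) := by
  unfold gridOf
  simp [List.map_flatMap, Function.comp_def]

lemma gridOf_keys_nodup (size : Int) (v : Int → Int → String) :
    ((gridOf size v).map (fun e => (e.1, e.2.1))).Nodup := by
  rw [gridOf_keys, List.nodup_flatMap]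
  constructor
  · intro i _
    exact List.Nodup.map (fun a b h => by simpa using h) (PySem.List.nodup_pyRange_one 0 size)
  · refine List.Pairwise.imp ?_ (PySem.List.nodup_pyRange_one 0 size)
    intro i i2 hne p hp hp2
    simp only [List.mem_map] at hp hp2
    obtain ⟨j, _, rfl⟩ := hp
    obtain ⟨j2, _, h⟩ := hp2
    exact hne (by simpa using congrArg Prod.fst h.symm)

lemma dinsert_gridOf (size : Int) (v : Int → Int → String) (r c : Int) (x : String)
    (hr0 : 0 ≤ r) (hr : r < size) (hc0 : 0 ≤ c) (hc : c < size) :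
    dinsert (gridOf size v) (r, c) x
      = gridOf size (fun i j => if i = r ∧ j = c then x else v i j) := by
  have hmem : (r, c) ∈ (gridOf size v).map (fun e => (e.1, e.2.1)) := by
    rw [gridOf_keys]
    simp only [List.mem_flatMap, List.mem_map]
    exact ⟨r, PySem.List.mem_pyRange_one.2 ⟨hr0, hr⟩,
      c, PySem.List.mem_pyRange_one.2 ⟨hc0, hc⟩, rfl⟩
  rw [dinsert_eq_map_of_mem _ r c x (gridOf_keys_nodup size v) hmem]
  unfold gridOf
  rw [List.map_flatMap]
  refine List.flatMap_congr fun i _ => ?_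
  rw [List.map_map]
  refine List.map_congr_left fun j _ => ?_
  by_cases h : i = r ∧ j = c <;> simp [h, Function.comp]

lemma blocksFoldB (size : Int) (bs : List (List Int)) (v : Int → Int → String) :
    bs.foldl (stepBlockB size) (gridOf size v)
      = gridOf size (fun i j => if bs.any (hitA i j) then "b" else v i j) := by
  induction bs generalizing v with
  | nil =>
    simp only [List.foldl_nil, List.any_nil]
    exact (gridOf_congr size _ _ (fun i j _ _ _ _ => by simp)).symm
  | cons b bs ih =>
    rw [List.foldl_cons]
    rcases h1 : PySem.List.pyGet? b 1 with _ | r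
    · have hstep : stepBlockB size (gridOf size v) b = gridOf size v := by
        unfold stepBlockB; rw [h1]
      rw [hstep, ih]
      refine gridOf_congr size _ _ (fun i j _ _ _ _ => ?_)
      simp [List.any_cons, hitA, h1]
    by_cases hr : 0 ≤ r ∧ r < size
    · rcases h2 : PySem.List.pyGet? b 2 with _ | c
      · have hstep : stepBlockB size (gridOf size v) b = gridOf size v := by
          unfold stepBlockB; rw [h1, h2]; simp [hr]
        rw [hstep, ih]
        refine gridOf_congr size _ _ (fun i j _ _ _ _ => ?_)
        simp [List.any_cons, hitA, h1, h2]
      by_cases hc : 0 ≤ c ∧ c < size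
      · have hstep : stepBlockB size (gridOf size v) b = dinsert (gridOf size v) (r, c) "b" := by
          unfold stepBlockB; rw [h1, h2]; simp [hr, hc]
        rw [hstep, dinsert_gridOf size v r c "b" hr.1 hr.2 hc.1 hc.2, ih]
        refine gridOf_congr size _ _ (fun i j _ _ _ _ => ?_)
        by_cases hany : bs.any (hitA i j)
        · simp [List.any_cons, hany]
        · by_cases hij : i = r ∧ j = c
          · obtain ⟨rfl, rfl⟩ := hij
            simp [List.any_cons, hany, hitA, h1, h2]
          · have hhit : hitA i j b = false := by
              simp only [hitA, h1, h2, Bool.and_eq_false_iff, beq_eq_false_iff_ne, ne_eq,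
                Option.some.injEq]
              omega
            simp [List.any_cons, hany, hhit, hij]
      · have hstep : stepBlockB size (gridOf size v) b = gridOf size v := by
          unfold stepBlockB; rw [h1, h2]; simp [hr, hc]
        rw [hstep, ih]
        refine gridOf_congr size _ _ (fun i j hi0 hi hj0 hj => ?_)
        have hhit : hitA i j b = false := by
          simp only [hitA, h1, h2, Bool.and_eq_false_iff, beq_eq_false_iff_ne, ne_eq,
            Option.some.injEq]
          omega
        simp [List.any_cons, hhit]
    · have hstep : stepBlockB size (gridOf size v) b = gridOf size v := by
        unfold stepBlockB; rw [h1]; simp [hr]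
      rw [hstep, ih]
      refine gridOf_congr size _ _ (fun i j hi0 hi hj0 hj => ?_)
      have hhit : hitA i j b = false := by
        simp only [hitA, h1, Bool.and_eq_false_iff, beq_eq_false_iff_ne, ne_eq,
          Option.some.injEq]
        omega
      simp [List.any_cons, hhit]

lemma filling_alt_eq_gridOf (blocks : List (List Int)) (size : Int) :
    filling_alt blocks size = gridOf size (markOf blocks) := by
  unfold filling_alt
  have hgrid : ((PySem.List.pyRange 0 size 1).flatMap (fun i =>
      (PySem.List.pyRange 0 size 1).map (fun j => (i, j, "empty"))))
      = gridOf size (fun _ _ => "empty") := rfl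
  by_cases hs : 0 < size
  · simp only [hgrid, if_pos hs, blocksFoldB]
    rfl
  · simp only [hgrid, if_neg hs]
    have hr : PySem.List.pyRange 0 size 1 = [] := by
      apply List.eq_nil_iff_forall_not_mem.2
      intro x hx
      rw [PySem.List.mem_pyRange_one] at hx
      omega
    unfold gridOf
    rw [hr]
    simp

-- ===== VERDICT (by name: the statement is the Claim_ definition above) =====
theorem filling_spec : Claim_equal_filling := by
  intro blocks size _ _
  unfold Spec_filling
  rw [filling_eq_gridOf, filling_alt_eq_gridOf]
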